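-- pv_equiv track=rewrite | github.com/Nekkowe/advent-of-code-2019 | 6.py | generateDjikstraMap
-- ===== SOURCE A (Python) =====
-- def getConnectedObjects(object_id, orbits):
-- 	forward_lookup = [orbits[object_id] if object_id in orbits.keys() else None]
-- 	reverse_lookup = [key for key in orbits if (orbits[key] == object_id)]
-- 	return forward_lookup + reverse_lookup
--
-- def generateDjikstraMap(orbits, destination):
-- 	queue = [destination]
-- 	djikstra_map = {destination: 0}
--
-- 	while len(queue):
-- 		current_object = queue.pop(0)
-- 		distance = djikstra_map[current_object]
-- 		connected_objects = getConnectedObjects(current_object, orbits)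
--
-- 		for object_id in connected_objects:
-- 			if object_id not in djikstra_map.keys():
-- 				djikstra_map[object_id] = distance + 1
-- 				queue.append(object_id)
--
-- 	return djikstra_map
-- ===== SOURCE B (Python) =====
-- def generateDjikstraMap(orbits, destination):
-- 	children = {}
-- 	for key, value in orbits.items():
-- 		children.setdefault(value, []).append(key)
--
-- 	distances = {destination: 0}
-- 	order = [destination]
-- 	i = 0
--
-- 	while i < len(order):
-- 		current = order[i]
-- 		i += 1
-- 		d = distances[current]
--
-- 		for neighbour in [orbits.get(current)] + children.get(current, []):
-- 			if neighbour not in distances: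
-- 				distances[neighbour] = d + 1
-- 				order.append(neighbour)
--
-- 	return distances
-- ===== Notes on version B (the rewrite author's own statement) =====
-- stated objective: alternative
-- what changed: B precomputes a reverse-adjacency (children) dict in one pass so the per-node scan of all orbits disappears, and replaces queue.pop(0) with an index pointer into a grow-only order list; same BFS visit order, hence identical dict and insertion order. (Asymptotically lighter on connected graphs, but not measurably faster on the random benchmark inputs.)
import Mathlib
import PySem

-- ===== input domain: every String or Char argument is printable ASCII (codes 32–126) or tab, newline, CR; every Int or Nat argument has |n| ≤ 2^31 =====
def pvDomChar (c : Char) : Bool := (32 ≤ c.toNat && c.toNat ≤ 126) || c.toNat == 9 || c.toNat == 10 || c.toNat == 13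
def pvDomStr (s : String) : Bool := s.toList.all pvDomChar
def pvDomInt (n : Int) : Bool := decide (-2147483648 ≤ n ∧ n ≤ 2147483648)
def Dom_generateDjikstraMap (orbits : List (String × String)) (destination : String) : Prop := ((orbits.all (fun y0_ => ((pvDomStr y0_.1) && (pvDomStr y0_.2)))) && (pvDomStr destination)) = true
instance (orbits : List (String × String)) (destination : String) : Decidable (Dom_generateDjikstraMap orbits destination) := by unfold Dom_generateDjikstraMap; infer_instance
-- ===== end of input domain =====

-- B precomputes a reverse-adjacency (children) dict and drives the BFS with an index pointer
-- instead of queue.pop(0); it visits nodes in the same order, so the returned dict is identical.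


-- ===== PORT A =====
-- getConnectedObjects: forward_lookup is [orbits[id] if id in orbits else None]; reverse_lookup
-- scans every key of orbits.  (orbits[key] == object_id: the lookup on a key always succeeds,
-- so `get? key == objectId` is exactly Python's `orbits[key] == object_id`, incl. object_id = None.)
def getConnectedObjectsA (orbits : PySem.Dict String String)
    (objectId : Option String) : List (Option String) :=
  let forwardLookup : List (Option String) := [objectId.bind (fun s => orbits.get? s)]
  let reverseLookup : List (Option String) :=
    (orbits.keys.filter (fun key => orbits.get? key == objectId)).map some
  forwardLookup ++ reverseLookup

-- the while-loop; fuel merely makes it total: each iteration pops one queue element and every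
-- element ever enqueued is a distinct dict key drawn from {destination, None} ∪ keys ∪ values,
-- so 2*|orbits|+2 iterations always suffice.  State: (djikstra_map, queue).
def loopA (orbits : PySem.Dict String String) :
    Nat → List (Option String) → PySem.Dict (Option String) Int →
    PySem.Dict (Option String) Int
  | 0, _, djikstraMap => djikstraMap
  | _ + 1, [], djikstraMap => djikstraMap
  | fuel + 1, currentObject :: queue, djikstraMap =>
      let distance := djikstraMap.getD currentObject 0  -- key always present: enqueued ⇒ inserted
      let connectedObjects := getConnectedObjectsA orbits currentObject
      let st := connectedObjects.foldl
        (fun st objectId =>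
          if st.1.contains objectId then st
          else (st.1.insert objectId (distance + 1), st.2 ++ [objectId]))
        (djikstraMap, queue)
      loopA orbits fuel st.2 st.1

def generateDjikstraMap (orbits : List (String × String)) (destination : String) :
    List (Option String × Int) :=
  (loopA (PySem.Dict.mk orbits) (2 * orbits.length + 2) [some destination]
    (PySem.Dict.ofList [(some destination, 0)])).items

-- ===== PORT B =====
-- [orbits.get(current)] + children.get(current, [])  (children has only string keys, so the
-- current = None case reads the default [])
def neighboursB (orbitsD : PySem.Dict String String)
    (children : PySem.Dict String (List String)) (current : Option String) :
    List (Option String) :=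
  (current.bind (fun s => orbitsD.get? s)) ::
    (match current with
      | none => []
      | some s => children.getD s []).map some

-- while i < len(order): …  (fuel makes it total, as in loopA).  State: (distances, order).
def loopB (orbitsD : PySem.Dict String String)
    (children : PySem.Dict String (List String)) :
    Nat → Nat → List (Option String) → PySem.Dict (Option String) Int →
    PySem.Dict (Option String) Int
  | 0, _, _, distances => distances
  | fuel + 1, i, order, distances =>
      match order[i]? with
      | none => distances
      | some current =>
        let d := distances.getD current 0
        let st := (neighboursB orbitsD children current).foldl
          (fun st neighbour =>
            if st.1.contains neighbour then st
            else (st.1.insert neighbour (d + 1), st.2 ++ [neighbour]))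
          (distances, order)
        loopB orbitsD children fuel (i + 1) st.2 st.1

def generateDjikstraMap_alt (orbits : List (String × String)) (destination : String) :
    List (Option String × Int) :=
  let children := orbits.foldl
    (fun d p => d.modify p.2 [] (fun l => l ++ [p.1])) PySem.Dict.empty
  (loopB (PySem.Dict.mk orbits) children (2 * orbits.length + 2) 0 [some destination]
    (PySem.Dict.ofList [(some destination, 0)])).items

-- ===== PRECONDITION & SPEC =====
-- orbits is a Python dict, whose association-list encoding never contains a duplicate key;
-- Pre_ only excludes duplicate-key lists, which no Python call can produce.
def Pre_generateDjikstraMap (orbits : List (String × String)) (destination : String) : Prop :=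
  (orbits.map Prod.fst).Nodup
instance (orbits : List (String × String)) (destination : String) :
    Decidable (Pre_generateDjikstraMap orbits destination) := by
  unfold Pre_generateDjikstraMap; infer_instance

def pvWitness_generateDjikstraMap : (List (String × String)) × String :=
  ([("B", "COM"), ("C", "B"), ("D", "C")], "C")

def Spec_generateDjikstraMap (orbits : List (String × String)) (destination : String) (out : List (Option String × Int)) : Prop := out = generateDjikstraMap_alt orbits destination
instance (orbits : List (String × String)) (destination : String) (out : List (Option String × Int)) : Decidable (Spec_generateDjikstraMap orbits destination out) := by unfold Spec_generateDjikstraMap; infer_instance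

-- ===== CLAIM (what is proved, stated in full; the proofs are below) =====
def Claim_equal_generateDjikstraMap : Prop := ∀ (orbits : List (String × String)) (destination : String), Dom_generateDjikstraMap orbits destination → Pre_generateDjikstraMap orbits destination → Spec_generateDjikstraMap orbits destination (generateDjikstraMap orbits destination)

-- ===== LEMMAS AND PROOFS =====

-- children.get(s, []) is exactly the list of keys whose value is s, in orbit order
lemma childrenB_getD (orbits : List (String × String)) (s : String) :
    (orbits.foldl (fun d p => d.modify p.2 [] (fun l => l ++ [p.1]))
        PySem.Dict.empty).getD s [] =
      (orbits.filter (fun p => p.2 == s)).map Prod.fst := by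
  have h1 : orbits.foldl (fun d p => d.modify p.2 [] (fun l => l ++ [p.1])) PySem.Dict.empty
      = (orbits.map (fun p => (p.2, p.1))).foldl
          (fun d p => d.modify p.1 [] (fun l => l ++ [p.2])) PySem.Dict.empty := by
    rw [List.foldl_map]
  rw [h1, PySem.Dict.getD_foldl_modify_append]
  simp [List.filter_map, Function.comp_def]

-- under distinct keys, A's reverse scan of the dict equals B's precomputed children list
lemma keys_filter_eq (orbits : List (String × String))
    (h : (orbits.map Prod.fst).Nodup) (s : String) :
    (PySem.Dict.mk orbits).keys.filter
        (fun key => (PySem.Dict.mk orbits).get? key == some s) =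
      (orbits.filter (fun p => p.2 == s)).map Prod.fst := by
  induction orbits with
  | nil => simp [PySem.Dict.keys]
  | cons p rest ih =>
    obtain ⟨a, b⟩ := p
    simp only [List.map_cons, List.nodup_cons] at h
    have hk : (PySem.Dict.mk ((a, b) :: rest)).keys = a :: (PySem.Dict.mk rest).keys := by
      simp [PySem.Dict.keys]
    rw [hk, List.filter_cons, List.filter_cons]
    have hga : (PySem.Dict.mk ((a, b) :: rest)).get? a = some b := by
      simp [PySem.Dict.get?_mk_cons]
    have hrest : (PySem.Dict.mk rest).keys.filter
          (fun key => (PySem.Dict.mk ((a, b) :: rest)).get? key == some s) =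
        (PySem.Dict.mk rest).keys.filter
          (fun key => (PySem.Dict.mk rest).get? key == some s) := by
      apply List.filter_congr
      intro k hkmem
      have hne : a ≠ k := by
        intro he; subst he
        exact h.1 (by simpa [PySem.Dict.keys] using hkmem)
      simp [PySem.Dict.get?_mk_cons, hne]
    rw [hga] at *
    by_cases hb : b = s
    · subst hb
      simp only [beq_self_eq_true, if_pos]
      rw [hrest, ih h.2]
      simp
    · have hf : ((some b == some s) : Bool) = false := by simp [hb]
      simp only [hf, Bool.false_eq_true]
      rw [hrest, ih h.2]
      have hf2 : ((b == s) : Bool) = false := by simp [hb]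
      simp [hf2]

-- the two neighbour computations agree
lemma conn_eq (orbits : List (String × String)) (h : (orbits.map Prod.fst).Nodup)
    (cur : Option String) :
    getConnectedObjectsA (PySem.Dict.mk orbits) cur =
      neighboursB (PySem.Dict.mk orbits)
        (orbits.foldl (fun d p => d.modify p.2 [] (fun l => l ++ [p.1]))
          PySem.Dict.empty) cur := by
  unfold getConnectedObjectsA neighboursB
  cases cur with
  | none =>
    simp only [List.singleton_append, List.cons.injEq, true_and, List.map_nil,
      List.map_eq_nil_iff, List.filter_eq_nil_iff]
    intro k hk
    have hne : ¬ (PySem.Dict.mk orbits).get? k = none := by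
      intro he
      exact (PySem.Dict.get?_eq_none_iff_not_mem_keys _ _).mp he hk
    simpa using hne
  | some s =>
    simp only [List.singleton_append, List.cons.injEq, true_and]
    rw [keys_filter_eq orbits h s, childrenB_getD orbits s]

-- the inner for-loop only appends to the list component
lemma fold_len_mono (nbrs : List (Option String)) (d : Int)
    (st : PySem.Dict (Option String) Int × List (Option String)) :
    st.2.length ≤ (nbrs.foldl
      (fun st o => if st.1.contains o then st
        else (st.1.insert o (d + 1), st.2 ++ [o])) st).2.length := by
  induction nbrs generalizing st with
  | nil => simp
  | cons o rest ih =>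
    simp only [List.foldl_cons]
    refine le_trans ?_ (ih _)
    by_cases hc : st.1.contains o
    · simp [hc]
    · simp [hc]

-- the inner for-loop commutes with dropping a fixed prefix of the list component
lemma fold_drop (nbrs : List (Option String)) (d : Int)
    (m : PySem.Dict (Option String) Int) (order : List (Option String)) (i : Nat)
    (h : i ≤ order.length) :
    nbrs.foldl
        (fun st o => if st.1.contains o then st
          else (st.1.insert o (d + 1), st.2 ++ [o])) (m, order.drop i) =
      ((nbrs.foldl
        (fun st o => if st.1.contains o then st
          else (st.1.insert o (d + 1), st.2 ++ [o])) (m, order)).1,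
       (nbrs.foldl
        (fun st o => if st.1.contains o then st
          else (st.1.insert o (d + 1), st.2 ++ [o])) (m, order)).2.drop i) := by
  induction nbrs generalizing m order with
  | nil => simp
  | cons o rest ih =>
    simp only [List.foldl_cons]
    by_cases hc : m.contains o
    · simp only [hc, if_true]
      exact ih m order h
    · simp only [hc, Bool.false_eq_true, if_false]
      rw [← List.drop_append_of_le_length h]
      exact ih _ (order ++ [o]) (by simp; omega)

-- lock-step equality of the two loops: A's queue is B's order minus its first i elements
lemma loop_eq (D : PySem.Dict String String) (C : PySem.Dict String (List String))
    (hN : ∀ cur, getConnectedObjectsA D cur = neighboursB D C cur) :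
    ∀ (fuel i : Nat) (order : List (Option String))
      (m : PySem.Dict (Option String) Int), i ≤ order.length →
      loopA D fuel (order.drop i) m = loopB D C fuel i order m := by
  intro fuel
  induction fuel with
  | zero => intro i order m _; rfl
  | succ f ih =>
    intro i order m h
    rcases lt_or_eq_of_le h with hlt | heq
    · have hdrop : order.drop i = order[i] :: order.drop (i + 1) :=
        (List.getElem_cons_drop hlt).symm
      have hget : order[i]? = some order[i] := List.getElem?_eq_getElem hlt
      rw [hdrop]
      unfold loopA loopB
      rw [hget]
      simp only
      rw [hN order[i]]
      rw [fold_drop _ _ m order (i + 1) hlt]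
      exact ih (i + 1) _ _ (le_trans hlt (fold_len_mono _ _ (m, order)))
    · have hdrop : order.drop i = [] := by rw [heq]; simp
      rw [hdrop]
      unfold loopA loopB
      have hget : order[i]? = none := by
        rw [List.getElem?_eq_none_iff]; omega
      rw [hget]

-- ===== VERDICT (by name: the statement is the Claim_ definition above) =====
theorem generateDjikstraMap_spec : Claim_equal_generateDjikstraMap := by
  intro orbits destination _ hpre
  unfold Spec_generateDjikstraMap generateDjikstraMap generateDjikstraMap_alt
  have := loop_eq (PySem.Dict.mk orbits)
    (orbits.foldl (fun d p => d.modify p.2 [] (fun l => l ++ [p.1])) PySem.Dict.empty)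
    (fun cur => conn_eq orbits hpre cur)
    (2 * orbits.length + 2) 0 [some destination]
    (PySem.Dict.ofList [(some destination, 0)]) (by simp)
  simpa using congrArg PySem.Dict.items this
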